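-- pv_equiv track=rewrite | github.com/brividich/Security-Center-AI | security/ai/services/memory/evaluation.py | _first_relevant_rank
-- ===== SOURCE A (Python) =====
-- def _first_relevant_rank(retrieved_keys: list[str], expected_keys: list[str]) -> int | None:
--     if not expected_keys:
--         return None
--     expected = set(expected_keys)
--     for index, key in enumerate(retrieved_keys, start=1):
--         if key in expected:
--             return index
--     return None
-- ===== SOURCE B (Python) =====
-- def _first_relevant_rank(retrieved_keys: list[str], expected_keys: list[str]) -> int | None:
--     first_rank = {}
--     for index, key in enumerate(retrieved_keys, start=1):
--         if key not in first_rank: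
--             first_rank[key] = index
--     ranks = [first_rank[k] for k in expected_keys if k in first_rank]
--     return min(ranks) if ranks else None
-- ===== Notes on version B (the rewrite author's own statement) =====
-- stated objective: alternative
-- what changed: Instead of scanning retrieved and testing each key against a set of expected, B builds a first-occurrence rank index over retrieved once and takes the minimum rank over the expected keys that appear in it.
import Mathlib
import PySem

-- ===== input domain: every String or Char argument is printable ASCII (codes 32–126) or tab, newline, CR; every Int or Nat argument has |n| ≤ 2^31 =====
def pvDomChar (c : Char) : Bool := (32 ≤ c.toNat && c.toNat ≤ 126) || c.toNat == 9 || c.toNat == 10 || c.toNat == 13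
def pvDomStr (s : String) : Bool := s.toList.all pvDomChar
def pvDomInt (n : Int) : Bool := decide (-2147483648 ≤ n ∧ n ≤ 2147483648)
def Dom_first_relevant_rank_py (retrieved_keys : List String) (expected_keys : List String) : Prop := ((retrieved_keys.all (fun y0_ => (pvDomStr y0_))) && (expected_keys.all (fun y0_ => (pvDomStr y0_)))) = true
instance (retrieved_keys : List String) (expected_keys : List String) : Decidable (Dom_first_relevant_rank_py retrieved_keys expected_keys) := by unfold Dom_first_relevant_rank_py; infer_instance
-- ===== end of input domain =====

-- B replaces A's scan-retrieved-against-a-set with a first-occurrence rank index over retrieved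
-- and a minimum over expected (alternative decomposition, same asymptotic cost).


-- ===== PORT A =====
-- A's 'for index, key in enumerate(retrieved_keys, start=1): if key in expected: return index' loop
def faLoop (expected : PySem.Set String) : List (Int × String) → Option Int
  | [] => none
  | (i, k) :: rest => if PySem.Set.contains expected k then some i else faLoop expected rest

def first_relevant_rank_py (retrieved_keys : List String) (expected_keys : List String) : Option Int :=
  if expected_keys = [] then none
  else faLoop (PySem.Set.ofList expected_keys) (PySem.List.enumerate retrieved_keys 1)

-- ===== PORT B =====
-- B's 'for index, key in enumerate(retrieved_keys, start=1): if key not in first_rank: first_rank[key] = index' loop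
def fbBuild : List (Int × String) → PySem.Dict String Int → PySem.Dict String Int
  | [], d => d
  | (i, k) :: rest, d => fbBuild rest (if d.contains k then d else d.insert k i)

def first_relevant_rank_py_alt (retrieved_keys : List String) (expected_keys : List String) : Option Int :=
  let first_rank := fbBuild (PySem.List.enumerate retrieved_keys 1) PySem.Dict.empty
  let ranks := expected_keys.filterMap (fun k => first_rank.get? k)
  PySem.List.min? ranks (fun x => x)

-- ===== PRECONDITION & SPEC =====
def Spec_first_relevant_rank_py (retrieved_keys : List String) (expected_keys : List String) (out : Option Int) : Prop := out = first_relevant_rank_py_alt retrieved_keys expected_keys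
instance (retrieved_keys : List String) (expected_keys : List String) (out : Option Int) : Decidable (Spec_first_relevant_rank_py retrieved_keys expected_keys out) := by unfold Spec_first_relevant_rank_py; infer_instance

-- ===== CLAIM (what is proved, stated in full; the proofs are below) =====
def Claim_equal_first_relevant_rank_py : Prop := ∀ (retrieved_keys : List String) (expected_keys : List String), Dom_first_relevant_rank_py retrieved_keys expected_keys → Spec_first_relevant_rank_py retrieved_keys expected_keys (first_relevant_rank_py retrieved_keys expected_keys)

-- ===== LEMMAS AND PROOFS =====

-- unpack findIdx? = some i into the 'first index satisfying p' facts
theorem findIdx?_spec {α : Type} (l : List α) (p : α → Bool) (i : Nat) (h : l.findIdx? p = some i) :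
    ∃ hi : i < l.length, p (l[i]'hi) = true ∧ ∀ u (hu : u < i), p (l[u]'(Nat.lt_trans hu hi)) = false := by
  rw [List.findIdx?_eq_some_iff_findIdx_eq] at h
  obtain ⟨hi, hf⟩ := h
  subst hf
  exact ⟨hi, List.findIdx_getElem, fun u hu => List.not_of_lt_findIdx hu⟩

theorem findIdx?_some_of_mem {α : Type} (l : List α) (p : α → Bool) (x : α) (hx : x ∈ l)
    (hp : p x = true) : ∃ i, l.findIdx? p = some i := by
  have hlt := List.findIdx_lt_length_of_exists ⟨x, hx, hp⟩
  exact ⟨_, List.findIdx?_eq_some_iff_findIdx_eq.mpr ⟨hlt, rfl⟩⟩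

-- A's loop is the first index (shifted by the enumerate start) whose key lies in e
theorem faLoop_eq (e : List String) (r : List String) (i : Int) :
    faLoop (PySem.Set.ofList e) (PySem.List.enumerate r i)
      = (r.findIdx? (fun s => e.contains s)).map (fun j => i + (j : Int)) := by
  induction r generalizing i with
  | nil => simp [faLoop, PySem.List.enumerate_nil]
  | cons x xs ih =>
    rw [PySem.List.enumerate_cons, List.findIdx?_cons]
    by_cases hx : x ∈ e
    · simp [faLoop, PySem.Set.contains, PySem.Set.mem_ofList, hx]
    · simp only [faLoop]
      rw [if_neg (by simp [PySem.Set.contains, PySem.Set.mem_ofList, hx]),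
          if_neg (by simp [hx]), ih]
      cases h : xs.findIdx? (fun s => e.contains s) with
      | none => simp
      | some j => simp; ring

-- B's dict maps each key to the (shifted) index of its first occurrence in r
theorem fbBuild_get? (r : List String) (i : Int) (d : PySem.Dict String Int) (k : String) :
    (fbBuild (PySem.List.enumerate r i) d).get? k
      = if d.contains k then d.get? k
        else (r.findIdx? (fun s => s == k)).map (fun j => i + (j : Int)) := by
  induction r generalizing i d with
  | nil =>
    rw [PySem.List.enumerate_nil]
    simp only [fbBuild, List.findIdx?_nil]
    rw [PySem.Dict.contains_eq_isSome_get?]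
    cases h : d.get? k <;> simp
  | cons x xs ih =>
    rw [PySem.List.enumerate_cons]
    simp only [fbBuild]
    rw [ih, List.findIdx?_cons]
    by_cases hdx : d.contains x = true
    · simp only [hdx, if_true]
      by_cases hdk : d.contains k = true
      · simp [hdk]
      · simp only [hdk, if_false, Bool.false_eq_true]
        by_cases hxk : x = k
        · subst hxk
          rw [PySem.Dict.contains_eq_isSome_get?] at hdx hdk
          simp_all
        · rw [if_neg (by simp [hxk])]
          cases h : xs.findIdx? (fun s => s == k) with
          | none => simp
          | some j => simp; ring
    · simp only [hdx, if_false, Bool.false_eq_true]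
      by_cases hxk : x = k
      · subst hxk
        have h1 : (d.insert x i).contains x = true := by
          rw [PySem.Dict.contains_eq_isSome_get?, PySem.Dict.get?_insert_self]; rfl
        simp [h1, PySem.Dict.get?_insert_self, hdx]
      · have hg : (d.insert x i).get? k = d.get? k :=
          PySem.Dict.get?_insert_of_ne d i (Ne.symm hxk)
        have hc : (d.insert x i).contains k = d.contains k := by
          rw [PySem.Dict.contains_eq_isSome_get?, PySem.Dict.contains_eq_isSome_get?, hg]
        rw [hc, hg]
        by_cases hdk : d.contains k = true
        · simp [hdk]
        · simp only [hdk, if_false, Bool.false_eq_true]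
          rw [if_neg (by simp [hxk])]
          cases h : xs.findIdx? (fun s => s == k) with
          | none => simp
          | some j => simp; ring

-- the main equation behind the claim
theorem ab_eq (r e : List String) : first_relevant_rank_py r e = first_relevant_rank_py_alt r e := by
  have hget : ∀ k, (fbBuild (PySem.List.enumerate r 1) PySem.Dict.empty).get? k
      = (r.findIdx? (fun s => s == k)).map (fun j => 1 + (j : Int)) := by
    intro k
    rw [fbBuild_get?]
    have : (PySem.Dict.empty : PySem.Dict String Int).contains k = false := by
      rw [PySem.Dict.contains_eq_isSome_get?]; rfl
    simp [this]
  unfold first_relevant_rank_py first_relevant_rank_py_alt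
  simp only [hget]
  cases hj : r.findIdx? (fun s => e.contains s) with
  | none =>
    have hnil : e.filterMap
        (fun k => (r.findIdx? (fun s => s == k)).map (fun j => 1 + (j : Int))) = [] := by
      rw [List.filterMap_eq_nil_iff]
      intro k hk
      cases hfk : r.findIdx? (fun s => s == k) with
      | none => rfl
      | some t =>
        obtain ⟨ht, hpt, -⟩ := findIdx?_spec r _ t hfk
        have hrt : r[t] = k := by simpa using hpt
        have := List.findIdx?_eq_none_iff.mp hj r[t] (List.getElem_mem ht)
        rw [hrt] at this
        simp [hk] at this
    rw [hnil]
    by_cases he : e = []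
    · simp [he, PySem.List.min?]
    · rw [if_neg he, faLoop_eq, hj]
      simp [PySem.List.min?]
  | some j =>
    obtain ⟨hjl, hpj, hjmin⟩ := findIdx?_spec r _ j hj
    have hjm : r[j] ∈ e := by simpa using hpj
    have hene : e ≠ [] := by intro h; subst h; simp at hjm
    rw [if_neg hene, faLoop_eq, hj]
    -- (1 + j) is in the rank list
    have hfj : r.findIdx? (fun s => s == r[j]) = some j := by
      obtain ⟨t, hft⟩ := findIdx?_some_of_mem r (fun s => s == r[j]) r[j] (List.getElem_mem hjl) (by simp)
      obtain ⟨htl, hpt, htmin⟩ := findIdx?_spec r _ t hft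
      have hrt : r[t] = r[j] := by simpa using hpt
      have htj : t = j := by
        rcases lt_trichotomy t j with h | h | h
        · have := hjmin t h
          rw [hrt] at this
          simp [hjm] at this
        · exact h
        · have := htmin j h
          simp at this
      rw [htj] at hft; exact hft
    have hmem : (1 + (j : Int)) ∈ e.filterMap
        (fun k => (r.findIdx? (fun s => s == k)).map (fun u => 1 + (u : Int))) :=
      List.mem_filterMap.mpr ⟨r[j], hjm, by rw [hfj]; rfl⟩
    -- every rank in the list is ≥ 1 + j
    have hbound : ∀ y ∈ e.filterMap
        (fun k => (r.findIdx? (fun s => s == k)).map (fun u => 1 + (u : Int))),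
        (1 + (j : Int)) ≤ y := by
      intro y hy
      obtain ⟨k, hk, hfk⟩ := List.mem_filterMap.mp hy
      cases hfk2 : r.findIdx? (fun s => s == k) with
      | none => rw [hfk2] at hfk; simp at hfk
      | some t =>
        rw [hfk2] at hfk
        obtain ⟨ht, hpt, -⟩ := findIdx?_spec r _ t hfk2
        have hrt : r[t] = k := by simpa using hpt
        have hjt : j ≤ t := by
          by_contra h
          have := hjmin t (by omega)
          rw [hrt] at this
          simp [hk] at this
        have : y = 1 + (t : Int) := by simpa using hfk.symm
        omega
    cases hm : PySem.List.min? (e.filterMap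
        (fun k => (r.findIdx? (fun s => s == k)).map (fun u => 1 + (u : Int)))) (fun x => x) with
    | none =>
      rw [PySem.List.min?_eq_none_iff] at hm
      rw [hm] at hmem
      simp at hmem
    | some m =>
      have h1 := hbound m (PySem.List.min?_mem hm)
      have h2 := PySem.List.min?_isMin hm _ hmem
      show some (1 + (j : Int)) = some m
      exact congrArg some (le_antisymm h1 h2)

-- ===== VERDICT (by name: the statement is the Claim_ definition above) =====
theorem first_relevant_rank_py_spec : Claim_equal_first_relevant_rank_py := by
  intro r e _
  exact ab_eq r e
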